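-- pv_equiv track=rewrite | github.com/sapanda/lumian | api-synthesis/app/utils.py | split_indexed_lines_into_chunks
-- ===== SOURCE A (Python) =====
-- def split_indexed_lines_into_chunks(
--         text: str,
--         chunk_min_words: int) -> 'list[list[str]]':
--     """Split indexed lines into chunks"""
--     results, cur_results, lines, chunk_size = [], [], text.split("\n"), 0
--     n = len(lines)
--     for i in range(n):
--         line = lines[i]
--         cur_results.append(line)
--         chunk_size += len(line.split())
--         if chunk_size > chunk_min_words or i == n - 1:
--             results.append(cur_results)
--             cur_results, chunk_size = [], 0
--     return results
-- ===== SOURCE B (Python) =====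
-- def split_indexed_lines_into_chunks(
--         text: str,
--         chunk_min_words: int) -> 'list[list[str]]':
--     """Split indexed lines into chunks (cut-point search, then slicing)."""
--     lines = text.split("\n")
--     chunks = []
--     while True:
--         total, cut = 0, len(lines) - 1
--         for j, line in enumerate(lines):
--             total += len(line.split())
--             if total > chunk_min_words:
--                 cut = j
--                 break
--         chunks.append(lines[:cut + 1])
--         if cut == len(lines) - 1:
--             return chunks
--         lines = lines[cut + 1:]
-- ===== Notes on version B (the rewrite author's own statement) =====
-- stated objective: alternative
-- what changed: Instead of one interleaved accumulate-and-flush loop carrying partial-chunk state, B repeatedly searches for the next cut point (first line where the running word count exceeds the threshold) and materializes each chunk by slicing, recursing on the remainder.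
import Mathlib
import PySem

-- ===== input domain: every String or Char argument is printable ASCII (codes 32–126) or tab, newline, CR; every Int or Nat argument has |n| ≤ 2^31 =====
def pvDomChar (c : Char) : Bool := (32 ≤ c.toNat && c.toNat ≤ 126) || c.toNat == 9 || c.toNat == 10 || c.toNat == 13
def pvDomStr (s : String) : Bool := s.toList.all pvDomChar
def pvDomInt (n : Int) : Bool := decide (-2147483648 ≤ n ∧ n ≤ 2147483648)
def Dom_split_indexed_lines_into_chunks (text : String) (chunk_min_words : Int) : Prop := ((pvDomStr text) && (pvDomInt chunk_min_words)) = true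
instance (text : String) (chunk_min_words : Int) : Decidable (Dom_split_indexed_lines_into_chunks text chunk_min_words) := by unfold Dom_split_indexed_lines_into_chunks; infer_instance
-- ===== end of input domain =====

-- B replaces A's single accumulate-and-flush loop by a cut-point search plus slicing
-- (find the first line whose running word count exceeds the threshold, slice that chunk
-- off, recurse on the remainder); objective: alternative decomposition, same cost.

-- ===== PORT A =====
-- the for-loop of A as structural recursion over the lines, same state
-- (results, cur_results, chunk_size); Python's 'i == n - 1' is 'rest = []'.
def pvAGo (min : Int) : List String → List (List String) → List String → Int → List (List String)
  | [], results, _cur, _size => results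
  | line :: rest, results, cur, size =>
    let cur' := cur ++ [line]
    let size' := size + ((PySem.Str.split₀ line).length : Int)
    if size' > min ∨ rest = [] then pvAGo min rest (results ++ [cur']) [] 0
    else pvAGo min rest results cur' size'

def split_indexed_lines_into_chunks (text : String) (chunk_min_words : Int) : List (List String) :=
  pvAGo chunk_min_words ((PySem.Chars.splitOn text.toList ['\n']).map String.ofList) [] [] 0

-- ===== PORT B =====
-- Source B's inner 'for j, line in enumerate(lines)' search for the first cut point
def pvFindCut (min : Int) : Int → Nat → List String → Option Nat
  | _total, _j, [] => none
  | total, j, line :: rest =>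
    let total' := total + ((PySem.Str.split₀ line).length : Int)
    if total' > min then some j else pvFindCut min total' (j + 1) rest

-- Source B's outer 'while True' loop; 'lines[:cut+1]' / 'lines[cut+1:]' are PySem slices
def pvBGo (min : Int) (lines : List String) (chunks : List (List String)) : List (List String) :=
  let cut : Nat := (pvFindCut min 0 0 lines).getD (lines.length - 1)
  let chunks' := chunks ++ [PySem.List.slice lines none (some ((cut : Int) + 1))]
  if h : cut = lines.length - 1 then chunks'
  else pvBGo min (PySem.List.slice lines (some ((cut : Int) + 1)) none) chunks'
termination_by lines.length
decreasing_by
  have hc : ((cut : Int) + 1) = (((cut + 1 : Nat) : Int)) := by push_cast; ring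
  rw [hc, PySem.List.slice_from_natCast, List.length_drop]
  have hne : lines ≠ [] := by
    intro he
    simp [he, pvFindCut, cut] at h
  have hlen : 0 < lines.length := List.length_pos_iff.mpr hne
  omega

def split_indexed_lines_into_chunks_alt (text : String) (chunk_min_words : Int) : List (List String) :=
  pvBGo chunk_min_words ((PySem.Chars.splitOn text.toList ['\n']).map String.ofList) []

-- ===== PRECONDITION & SPEC =====
def Spec_split_indexed_lines_into_chunks (text : String) (chunk_min_words : Int) (out : List (List String)) : Prop := out = split_indexed_lines_into_chunks_alt text chunk_min_words
instance (text : String) (chunk_min_words : Int) (out : List (List String)) : Decidable (Spec_split_indexed_lines_into_chunks text chunk_min_words out) := by unfold Spec_split_indexed_lines_into_chunks; infer_instance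

-- ===== CLAIM (what is proved, stated in full; the proofs are below) =====
def Claim_equal_split_indexed_lines_into_chunks : Prop := ∀ (text : String) (chunk_min_words : Int), Dom_split_indexed_lines_into_chunks text chunk_min_words → Spec_split_indexed_lines_into_chunks text chunk_min_words (split_indexed_lines_into_chunks text chunk_min_words)

-- ===== LEMMAS AND PROOFS =====

-- splitOn never returns the empty list (Python's s.split(sep) always has ≥ 1 piece)
theorem pv_go_ne_nil (sep : List Char) : ∀ (fuel : Nat) (l cur : List Char) (acc : List (List Char)),
    PySem.Chars.splitOn.go sep fuel l cur acc ≠ [] := by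
  intro fuel
  induction fuel with
  | zero => intro l cur acc; simp [PySem.Chars.splitOn.go]
  | succ fuel ih =>
    intro l cur acc
    cases l with
    | nil => simp [PySem.Chars.splitOn.go]
    | cons c rest =>
      rw [PySem.Chars.splitOn.go]
      split_ifs with h
      · exact ih _ _ _
      · exact ih _ _ _

theorem pv_splitOn_ne_nil (s sep : List Char) : PySem.Chars.splitOn s sep ≠ [] := by
  unfold PySem.Chars.splitOn
  exact pv_go_ne_nil sep _ s [] []

-- midpoint description of B restarted in the middle of a chunk (proof helper)
def pvBMid (min size : Int) (cur : List String) (lines : List String) : List (List String) :=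
  match pvFindCut min size 0 lines with
  | none => [cur ++ lines]
  | some j =>
    if j = lines.length - 1 then [cur ++ lines]
    else (cur ++ lines.take (j + 1)) :: pvBGo min (lines.drop (j + 1)) []

theorem pv_findCut_shift (min : Int) : ∀ (xs : List String) (t : Int) (j : Nat),
    pvFindCut min t j xs = (pvFindCut min t 0 xs).map (j + ·) := by
  intro xs
  induction xs with
  | nil => intro t j; simp [pvFindCut]
  | cons x xs ih =>
    intro t j
    by_cases hc : t + ((PySem.Str.split₀ x).length : Int) > min
    · simp [pvFindCut, hc]
    · simp only [pvFindCut, if_neg hc]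
      rw [ih _ (j + 1), ih _ 1]
      cases pvFindCut min (t + ((PySem.Str.split₀ x).length : Int)) 0 xs with
      | none => simp
      | some k => simp; omega

theorem pv_bgo_acc (min : Int) : ∀ (n : Nat) (lines : List String), lines.length = n →
    ∀ (chunks : List (List String)), pvBGo min lines chunks = chunks ++ pvBGo min lines [] := by
  intro n
  induction n using Nat.strong_induction_on with
  | _ n ih =>
    intro lines hlen chunks
    set cut : Nat := (pvFindCut min 0 0 lines).getD (lines.length - 1) with hcut
    conv_lhs => rw [pvBGo]
    conv_rhs => rw [pvBGo]
    by_cases h : cut = lines.length - 1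
    · rw [dif_pos h, dif_pos h]
      simp
    · rw [dif_neg h, dif_neg h]
      have hne : lines ≠ [] := by
        intro he
        simp [he, pvFindCut, hcut] at h
      have hlt : (PySem.List.slice lines (some ((cut : Int) + 1)) none).length < n := by
        have hc : ((cut : Int) + 1) = (((cut + 1 : Nat) : Int)) := by push_cast; ring
        rw [hc, PySem.List.slice_from_natCast, List.length_drop]
        have : 0 < lines.length := List.length_pos_iff.mpr hne
        omega
      simp only [← hcut, List.nil_append]
      rw [ih _ hlt _ rfl, ih _ hlt _ rfl]
      simp
      conv_rhs => rw [ih _ hlt _ rfl]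
      simp

theorem pv_bgo_eq_mid (min : Int) (lines : List String) (hne : lines ≠ []) :
    pvBGo min lines [] = pvBMid min 0 [] lines := by
  have hpos : 0 < lines.length := List.length_pos_iff.mpr hne
  rw [pvBGo, pvBMid]
  cases hfc : pvFindCut min 0 0 lines with
  | none =>
    simp only [Option.getD_none]
    rw [dif_pos trivial]
    have hc : ((((lines.length - 1 : Nat)) : Int) + 1) = ((lines.length : Nat) : Int) := by
      omega
    rw [hc, PySem.List.slice_to_natCast, List.take_length]
    simp
  | some j =>
    simp only [Option.getD_some]
    by_cases hj : j = lines.length - 1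
    · rw [dif_pos hj]
      have hc : ((j : Int) + 1) = (((j + 1 : Nat) : Int)) := by push_cast; ring
      rw [hc, PySem.List.slice_to_natCast]
      have : j + 1 = lines.length := by omega
      rw [this, List.take_length]
      simp [hj]
    · rw [dif_neg hj]
      have hc : ((j : Int) + 1) = (((j + 1 : Nat) : Int)) := by push_cast; ring
      rw [hc, PySem.List.slice_to_natCast, PySem.List.slice_from_natCast]
      rw [pv_bgo_acc min _ _ rfl]
      simp [hj]

theorem pv_ago_eq (min : Int) : ∀ (lines : List String), lines ≠ [] →
    ∀ (results : List (List String)) (cur : List String) (size : Int),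
    pvAGo min lines results cur size = results ++ pvBMid min size cur lines := by
  intro lines
  induction lines with
  | nil => intro h; exact absurd rfl h
  | cons line rest ih =>
    intro _ results cur size
    by_cases hgt : size + ((PySem.Str.split₀ line).length : Int) > min
    · by_cases hr : rest = []
      · subst hr
        simp [pvAGo, hgt, pvBMid, pvFindCut]
      · have hstep : pvAGo min (line :: rest) results cur size
            = pvAGo min rest (results ++ [cur ++ [line]]) [] 0 := by
          simp [pvAGo, hgt]
        rw [hstep, ih hr, ← pv_bgo_eq_mid min rest hr]
        rw [pvBMid]
        simp only [pvFindCut, if_pos hgt]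
        have hlen : rest.length ≥ 1 := by
          cases rest with
          | nil => exact absurd rfl hr
          | cons a b => simp
        have h0 : ¬ ((0 : Nat) = (line :: rest).length - 1) := by simp; omega
        rw [if_neg h0]
        simp
    · by_cases hr : rest = []
      · subst hr
        simp [pvAGo, hgt, pvBMid, pvFindCut]
      · have hstep : pvAGo min (line :: rest) results cur size
            = pvAGo min rest results (cur ++ [line]) (size + ((PySem.Str.split₀ line).length : Int)) := by
          simp [pvAGo, hgt, hr]
        rw [hstep, ih hr]
        congr 1
        rw [pvBMid, pvBMid]
        simp only [pvFindCut, if_neg hgt]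
        rw [pv_findCut_shift min rest _ 1]
        have hlen : rest.length ≥ 1 := by
          cases rest with
          | nil => exact absurd rfl hr
          | cons a b => simp
        cases hfc : pvFindCut min (size + ((PySem.Str.split₀ line).length : Int)) 0 rest with
        | none => simp
        | some j =>
          simp only [Option.map_some]
          have hiff : (j = rest.length - 1) ↔ ((1 + j : Nat) = (line :: rest).length - 1) := by
            simp; omega
          by_cases hj : j = rest.length - 1
          · rw [if_pos hj, if_pos (hiff.mp hj)]
            simp
          · rw [if_neg hj, if_neg (fun hh => hj (hiff.mpr hh))]
            have h1 : (1 + j) + 1 = (j + 1) + 1 := by omega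
            rw [h1, List.take_succ_cons, List.drop_succ_cons]
            simp

-- ===== VERDICT (by name: the statement is the Claim_ definition above) =====
theorem split_indexed_lines_into_chunks_spec : Claim_equal_split_indexed_lines_into_chunks := by
  intro text chunk_min_words _
  unfold Spec_split_indexed_lines_into_chunks
  unfold split_indexed_lines_into_chunks split_indexed_lines_into_chunks_alt
  have hne : (PySem.Chars.splitOn text.toList ['\n']).map String.ofList ≠ [] := by
    simp [List.map_eq_nil_iff, pv_splitOn_ne_nil]
  rw [pv_ago_eq _ _ hne, pv_bgo_eq_mid _ _ hne]
  simp
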